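-- pv_equiv track=rewrite | github.com/nodeexcel/atul-shoma-femr-pipeline | scripts/femr_netsuite_report_6.py | _build_tasks
-- ===== SOURCE A (Python) =====
-- QUARTERS = ["Q1", "Q2", "Q3", "Q4"]
--
-- ACTUALS_BUDGET_ACCOUNTS = [
--     ("Labor Hours statistical account", None),
--     ("Labor Cost 5001",                 "5001 DIR : Direct Labor"),
--     ("Fringe 5990",                     "5990 ALLO : Allo Fringe"),
--     ("Travel 5004",                     "5004 DIR : Direct Travel"),
--     ("Subcontracting 5005",             "5005 DIR : Subrecipient Costs"),
--     ("Consulting 5002",                 "5002 DIR : Direct Consulting"),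
--     ("Equipment 5010",                  "5010 DIR : EQ & Materials (NO OH)"),
--     ("Equipment 5008",                  "5008 DIR : Direct Equipment"),
--     ("Other Direct Costs 5009",         "5009 DIR : Direct Other Costs"),
--     ("Material 5003",                   "5003 DIR : Direct Materials"),
--     ("Sub K Overhead 5992",             "5992 ALLO : Allo SubK OH"),
--     ("Sub K Overhead 5993",             "5993 ALLO : DNU ALLO G and A OH WFD"),
--     ("G&A 5991",                        "5991 ALLO : Allo G and A"),
-- ]
--
-- CONTRACTING_ACCOUNTS = [
--     ("Committed",  "Committed"),
--     ("Obligated",  "Obligated"),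
--     ("Expended",   "Expended"),
-- ]
--
-- def _build_tasks(fiscal_years: list) -> list:
--     """Build (fye, quarter, segment, account) tuples."""
--     tasks = []
--     for year in fiscal_years:
--         fye = f"FYE 9/30/{year}"
--         for quarter in QUARTERS:
--             for _, account in ACTUALS_BUDGET_ACCOUNTS:
--                 if account is not None:
--                     tasks.append((fye, quarter, "ACTUALS",  account))
--                     tasks.append((fye, quarter, "BUDGETED", account))
--             for _, account in CONTRACTING_ACCOUNTS:
--                 tasks.append((fye, quarter, "CONTRACTING", account))
--     return tasks
-- ===== SOURCE B (Python) =====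
-- QUARTERS = ["Q1", "Q2", "Q3", "Q4"]
--
-- ACTUALS_BUDGET_ACCOUNTS = [
--     ("Labor Hours statistical account", None),
--     ("Labor Cost 5001",                 "5001 DIR : Direct Labor"),
--     ("Fringe 5990",                     "5990 ALLO : Allo Fringe"),
--     ("Travel 5004",                     "5004 DIR : Direct Travel"),
--     ("Subcontracting 5005",             "5005 DIR : Subrecipient Costs"),
--     ("Consulting 5002",                 "5002 DIR : Direct Consulting"),
--     ("Equipment 5010",                  "5010 DIR : EQ & Materials (NO OH)"),
--     ("Equipment 5008",                  "5008 DIR : Direct Equipment"),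
--     ("Other Direct Costs 5009",         "5009 DIR : Direct Other Costs"),
--     ("Material 5003",                   "5003 DIR : Direct Materials"),
--     ("Sub K Overhead 5992",             "5992 ALLO : Allo SubK OH"),
--     ("Sub K Overhead 5993",             "5993 ALLO : DNU ALLO G and A OH WFD"),
--     ("G&A 5991",                        "5991 ALLO : Allo G and A"),
-- ]
--
-- CONTRACTING_ACCOUNTS = [
--     ("Committed",  "Committed"),
--     ("Obligated",  "Obligated"),
--     ("Expended",   "Expended"),
-- ]
--
-- # Flat (segment, account) template, built once from the two account tables.
-- _ENTRIES = []
-- for _label, _acct in ACTUALS_BUDGET_ACCOUNTS: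
--     if _acct is not None:
--         _ENTRIES.append(("ACTUALS", _acct))
--         _ENTRIES.append(("BUDGETED", _acct))
-- for _label, _acct in CONTRACTING_ACCOUNTS:
--     _ENTRIES.append(("CONTRACTING", _acct))
--
--
-- def _build_tasks(fiscal_years: list) -> list:
--     """Build (fye, quarter, segment, account) tuples.
--
--     Single flat loop over task indices: index k is decoded with divmod into
--     (year index, quarter index, entry index) instead of iterating nested loops.
--     """
--     nq = len(QUARTERS)
--     ne = len(_ENTRIES)
--     per_year = nq * ne
--     tasks = []
--     for k in range(len(fiscal_years) * per_year):
--         y, r = divmod(k, per_year)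
--         q, e = divmod(r, ne)
--         seg, acct = _ENTRIES[e]
--         tasks.append((f"FYE 9/30/{fiscal_years[y]}", QUARTERS[q], seg, acct))
--     return tasks
-- ===== Notes on version B (the rewrite author's own statement) =====
-- stated objective: alternative
-- what changed: B replaces A's three nested loops with branching inside by a single flat index loop: a (segment, account) template list is built once, and then each task index k in range(len(years)*4*len(template)) is decoded with divmod into (year, quarter, entry) indices to emit the tuple directly.
import Mathlib
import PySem

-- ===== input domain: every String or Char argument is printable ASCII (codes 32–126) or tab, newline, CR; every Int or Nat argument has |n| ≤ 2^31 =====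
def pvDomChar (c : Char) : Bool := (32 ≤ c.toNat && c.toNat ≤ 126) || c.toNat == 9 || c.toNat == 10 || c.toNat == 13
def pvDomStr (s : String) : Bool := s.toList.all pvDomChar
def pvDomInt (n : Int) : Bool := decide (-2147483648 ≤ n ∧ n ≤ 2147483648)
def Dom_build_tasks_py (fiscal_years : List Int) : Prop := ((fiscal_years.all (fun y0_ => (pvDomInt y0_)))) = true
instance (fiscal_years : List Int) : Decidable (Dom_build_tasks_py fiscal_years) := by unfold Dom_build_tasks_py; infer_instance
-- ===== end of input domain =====

-- B builds a flat (segment, account) template once and emits tasks with a single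
-- flat index loop, decoding each index with divmod; objective: alternative.

-- ===== PORT A =====
def QUARTERS : List String := ["Q1", "Q2", "Q3", "Q4"]

def ACTUALS_BUDGET_ACCOUNTS : List (String × Option String) := [
  ("Labor Hours statistical account", none),
  ("Labor Cost 5001",                 some "5001 DIR : Direct Labor"),
  ("Fringe 5990",                     some "5990 ALLO : Allo Fringe"),
  ("Travel 5004",                     some "5004 DIR : Direct Travel"),
  ("Subcontracting 5005",             some "5005 DIR : Subrecipient Costs"),
  ("Consulting 5002",                 some "5002 DIR : Direct Consulting"),
  ("Equipment 5010",                  some "5010 DIR : EQ & Materials (NO OH)"),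
  ("Equipment 5008",                  some "5008 DIR : Direct Equipment"),
  ("Other Direct Costs 5009",         some "5009 DIR : Direct Other Costs"),
  ("Material 5003",                   some "5003 DIR : Direct Materials"),
  ("Sub K Overhead 5992",             some "5992 ALLO : Allo SubK OH"),
  ("Sub K Overhead 5993",             some "5993 ALLO : DNU ALLO G and A OH WFD"),
  ("G&A 5991",                        some "5991 ALLO : Allo G and A")]

def CONTRACTING_ACCOUNTS : List (String × String) := [
  ("Committed",  "Committed"),
  ("Obligated",  "Obligated"),
  ("Expended",   "Expended")]

-- one iteration of A's outer 'for year in fiscal_years' loop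
def pvStepYear (tasks : List (String × String × String × String)) (year : Int) :
    List (String × String × String × String) :=
  let fye := "FYE 9/30/" ++ PySem.Int.toStr year
  QUARTERS.foldl (fun tasks quarter =>
    let tasks := ACTUALS_BUDGET_ACCOUNTS.foldl (fun tasks p =>
      match p.2 with
      | some account => tasks ++ [(fye, quarter, "ACTUALS", account), (fye, quarter, "BUDGETED", account)]
      | none => tasks) tasks
    CONTRACTING_ACCOUNTS.foldl (fun tasks p =>
      tasks ++ [(fye, quarter, "CONTRACTING", p.2)]) tasks) tasks

def build_tasks_py (fiscal_years : List Int) : List (String × String × String × String) :=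
  fiscal_years.foldl pvStepYear []

-- ===== PORT B =====
-- the flat template Source B builds once (_ENTRIES), by the same two append loops
def pvEntries : List (String × String) :=
  CONTRACTING_ACCOUNTS.foldl (fun es p => es ++ [("CONTRACTING", p.2)])
    (ACTUALS_BUDGET_ACCOUNTS.foldl (fun es p =>
      match p.2 with
      | some acct => es ++ [("ACTUALS", acct), ("BUDGETED", acct)]
      | none => es) [])

def build_tasks_py_alt (fiscal_years : List Int) : List (String × String × String × String) :=
  let nq : Int := (QUARTERS.length : Int)
  let ne : Int := (pvEntries.length : Int)
  let perYear : Int := nq * ne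
  (PySem.List.pyRange 0 ((fiscal_years.length : Int) * perYear) 1).foldl
    (fun tasks k =>
      let y := PySem.Int.floordiv k perYear
      let r := PySem.Int.mod k perYear
      let q := PySem.Int.floordiv r ne
      let e := PySem.Int.mod r ne
      let p := PySem.List.pyGetD pvEntries e ("", "")
      tasks ++ [("FYE 9/30/" ++ PySem.Int.toStr (PySem.List.pyGetD fiscal_years y 0),
                 PySem.List.pyGetD QUARTERS q "", p.1, p.2)]) []

-- ===== PRECONDITION & SPEC =====
def Spec_build_tasks_py (fiscal_years : List Int) (out : List (String × String × String × String)) : Prop := out = build_tasks_py_alt fiscal_years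
instance (fiscal_years : List Int) (out : List (String × String × String × String)) : Decidable (Spec_build_tasks_py fiscal_years out) := by unfold Spec_build_tasks_py; infer_instance

-- ===== CLAIM (what is proved, stated in full; the proofs are below) =====
def Claim_equal_build_tasks_py : Prop := ∀ (fiscal_years : List Int), Dom_build_tasks_py fiscal_years → Spec_build_tasks_py fiscal_years (build_tasks_py fiscal_years)

-- ===== LEMMAS AND PROOFS =====
-- the block of tasks any single year contributes
def pvBlock (year : Int) : List (String × String × String × String) :=
  QUARTERS.flatMap (fun quarter =>
    pvEntries.map (fun e => ("FYE 9/30/" ++ PySem.Int.toStr year, quarter, e.1, e.2)))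

-- the tuple B emits for task index k
def pvBody (fys : List Int) (k : Int) : String × String × String × String :=
  let y := PySem.Int.floordiv k 108
  let r := PySem.Int.mod k 108
  let p := PySem.List.pyGetD pvEntries (PySem.Int.mod r 27) ("", "")
  ("FYE 9/30/" ++ PySem.Int.toStr (PySem.List.pyGetD fys y 0),
   PySem.List.pyGetD QUARTERS (PySem.Int.floordiv r 27) "", p.1, p.2)

-- A: one year's step appends exactly that year's block
theorem pvStepYear_eq (acc : List (String × String × String × String)) (year : Int) :
    pvStepYear acc year = acc ++ pvBlock year := by
  simp [pvStepYear, pvBlock, pvEntries, QUARTERS, ACTUALS_BUDGET_ACCOUNTS, CONTRACTING_ACCOUNTS,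
        List.foldl, List.flatMap, List.map]

theorem pvFoldA_eq (fiscal_years : List Int) :
    ∀ acc : List (String × String × String × String),
      fiscal_years.foldl pvStepYear acc = acc ++ fiscal_years.flatMap pvBlock := by
  induction fiscal_years with
  | nil => intro acc; simp
  | cons y ys ih =>
    intro acc
    simp only [List.foldl_cons, pvStepYear_eq, ih, List.flatMap_cons, List.append_assoc]

-- pvBody at a Nat index, with all divmod arithmetic moved to Nat
theorem pvBody_natCast (fys : List Int) (k : Nat) :
    pvBody fys (k : Int) =
      ("FYE 9/30/" ++ PySem.Int.toStr (fys.getD (k / 108) 0),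
       QUARTERS.getD (k % 108 / 27) "",
       (pvEntries.getD (k % 27) ("", "")).1,
       (pvEntries.getD (k % 27) ("", "")).2) := by
  unfold pvBody
  have h1 : PySem.Int.floordiv (k : Int) 108 = ((k / 108 : Nat) : Int) := by
    exact_mod_cast PySem.Int.floordiv_natCast k 108
  have h2 : PySem.Int.mod (k : Int) 108 = ((k % 108 : Nat) : Int) := by
    exact_mod_cast PySem.Int.mod_natCast k 108
  have h3 : PySem.Int.floordiv ((k % 108 : Nat) : Int) 27 = ((k % 108 / 27 : Nat) : Int) := by
    exact_mod_cast PySem.Int.floordiv_natCast (k % 108) 27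
  have h4 : PySem.Int.mod ((k % 108 : Nat) : Int) 27 = ((k % 27 : Nat) : Int) := by
    have hmm : k % 108 % 27 = k % 27 := Nat.mod_mod_of_dvd k (by norm_num)
    calc PySem.Int.mod ((k % 108 : Nat) : Int) 27 = ((k % 108 % 27 : Nat) : Int) := by
          exact_mod_cast PySem.Int.mod_natCast (k % 108) 27
      _ = ((k % 27 : Nat) : Int) := by rw [hmm]
  simp only [h1, h2, h3, h4, PySem.List.pyGetD_natCast]

-- the first 108 indices of a cons produce exactly the head year's block
theorem pvMap108 (y : Int) (ys : List Int) :
    (List.range 108).map (fun k : Nat => pvBody (y :: ys) (k : Int)) = pvBlock y := by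
  simp only [pvBody_natCast]
  with_unfolding_all rfl

-- B: the flat index map over the full range equals the flatMap of blocks
theorem pvMapRange_eq (fys : List Int) :
    (List.range (fys.length * 108)).map (fun k : Nat => pvBody fys (k : Int)) =
      fys.flatMap pvBlock := by
  induction fys with
  | nil => simp
  | cons y ys ih =>
    have hsplit : (y :: ys).length * 108 = 108 + ys.length * 108 := by
      simp [List.length_cons]; ring
    rw [hsplit, List.range_add, List.map_append, List.map_map]
    have h2 : (List.range (ys.length * 108)).map
        ((fun k : Nat => pvBody (y :: ys) (k : Int)) ∘ (fun i => 108 + i)) =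
        (List.range (ys.length * 108)).map (fun k : Nat => pvBody ys (k : Int)) := by
      apply List.map_congr_left
      intro k _
      simp only [Function.comp_apply]
      rw [pvBody_natCast, pvBody_natCast]
      have e1 : (108 + k) / 108 = k / 108 + 1 := by omega
      have e2 : (108 + k) % 108 = k % 108 := by omega
      have e3 : (108 + k) % 27 = k % 27 := by omega
      rw [e1, e2, e3, List.getD_cons_succ]
    rw [pvMap108, h2, ih, List.flatMap_cons]

theorem pvAlt_eq (fys : List Int) : build_tasks_py_alt fys = fys.flatMap pvBlock := by
  have hfold : build_tasks_py_alt fys =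
      (PySem.List.pyRange 0 ((fys.length : Int) * 108) 1).foldl
        (fun tasks k => tasks ++ [pvBody fys k]) [] := by with_unfolding_all rfl
  rw [hfold, PySem.List.foldl_append_singleton_eq_map, List.nil_append,
      PySem.List.pyRange_one]
  have htn : (((fys.length : Int) * 108) - 0).toNat = fys.length * 108 := by
    omega
  rw [htn, List.map_map]
  have hcomp : (List.range (fys.length * 108)).map
      ((fun k => pvBody fys k) ∘ (fun k : Nat => (0 : Int) + (k : Int))) =
      (List.range (fys.length * 108)).map (fun k : Nat => pvBody fys (k : Int)) := by
    apply List.map_congr_left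
    intro k _
    simp only [Function.comp_apply, zero_add]
  rw [hcomp, pvMapRange_eq]

-- ===== VERDICT (by name: the statement is the Claim_ definition above) =====
theorem build_tasks_py_spec : Claim_equal_build_tasks_py := by
  intro fys _
  unfold Spec_build_tasks_py build_tasks_py
  rw [pvAlt_eq, pvFoldA_eq]
  simp
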